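-- pv_equiv track=rewrite | github.com/Arsen1302/Code-copy-detector | TestData/solutions/problem_989_2.py | solution_989_2
-- ===== SOURCE A (Python) =====
-- from typing import List
--
-- def solution_989_2(arr: List[int], k: int) -> List[int]:
--     arr.sort()
--     n = len(arr)
--     median = arr[(n - 1) // 2]
--     res = []
--     left, right = 0, n - 1
--
--     for _ in range(k):
--         if median - arr[left] > arr[right] - median:
--             res.append(arr[left])
--             left += 1
--         else:
--             res.append(arr[right])
--             right -= 1
--
--     return res
-- ===== SOURCE B (Python) =====
-- from typing import List
--
-- def solution_989_2(arr: List[int], k: int) -> List[int]: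
--     arr.sort()
--     n = len(arr)
--     median = arr[(n - 1) // 2]
--     ordered = sorted(arr, key=lambda x: (-abs(x - median), -x))
--     return ordered[:max(k, 0)]
-- ===== Notes on version B (the rewrite author's own statement) =====
-- stated objective: idiomatic
-- what changed: Replaces the stateful two-pointer selection loop with a single declarative sort by the key (-abs(x-median), -x) followed by a slice, which yields the same greedy order (distance from median descending, ties toward the larger value).
-- outside the precondition, e.g. on solution_989_2([1, 2, 3], 4): A returns [3, 1, 2, 2], B returns [3, 1, 2]
import Mathlib
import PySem

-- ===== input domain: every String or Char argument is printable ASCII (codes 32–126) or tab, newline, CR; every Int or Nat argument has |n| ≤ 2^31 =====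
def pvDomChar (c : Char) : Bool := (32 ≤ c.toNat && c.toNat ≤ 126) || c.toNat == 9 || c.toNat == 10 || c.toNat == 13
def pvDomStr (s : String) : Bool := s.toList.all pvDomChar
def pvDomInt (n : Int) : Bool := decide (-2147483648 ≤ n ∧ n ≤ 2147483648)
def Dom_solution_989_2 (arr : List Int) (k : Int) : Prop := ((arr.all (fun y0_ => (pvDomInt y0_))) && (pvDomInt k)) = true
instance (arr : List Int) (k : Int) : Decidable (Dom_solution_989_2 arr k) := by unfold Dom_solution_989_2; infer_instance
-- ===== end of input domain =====

-- B replaces A's stateful two-pointer selection loop by one declarative sort with key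
-- (-abs(x - median), -x) plus a slice (idiomatic, same O(n log n) cost; not claimed faster).
-- Both A and B sort the argument list in place; the equivalence proved here is about the return value.

-- ===== PORT A =====
-- the 'for _ in range(k)' loop: state (res, left, right); indexing is exact within Pre_
-- (Pre_ keeps every index used in range, so the pyGetD default 0 is never taken)
def pvLoopA (s : List Int) (median : Int) : Nat → List Int × Int × Int → List Int × Int × Int
  | 0, st => st
  | fuel + 1, (res, l, r) =>
      if median - PySem.List.pyGetD s l 0 > PySem.List.pyGetD s r 0 - median then
        pvLoopA s median fuel (res ++ [PySem.List.pyGetD s l 0], l + 1, r)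
      else
        pvLoopA s median fuel (res ++ [PySem.List.pyGetD s r 0], l, r - 1)

def solution_989_2 (arr : List Int) (k : Int) : List Int :=
  let s := PySem.List.sorted arr (fun x => x)        -- arr.sort()
  let n : Int := s.length
  let median := PySem.List.pyGetD s (PySem.Int.floordiv (n - 1) 2) 0   -- arr[(n-1)//2]; in range ⇐ Pre_ (arr ≠ [])
  (pvLoopA s median k.toNat ([], 0, n - 1)).1        -- range(k) iterates max(k,0) times

-- ===== PORT B =====
def solution_989_2_alt (arr : List Int) (k : Int) : List Int :=
  let s := PySem.List.sorted arr (fun x => x)        -- arr.sort()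
  let n : Int := s.length
  let median := PySem.List.pyGetD s (PySem.Int.floordiv (n - 1) 2) 0   -- arr[(n-1)//2]; in range ⇐ Pre_ (arr ≠ [])
  let ordered := PySem.List.sorted2 s (fun x => -(|x - median|)) (fun x => -x)  -- sorted(arr, key=lambda x: (-abs(x-median), -x))
  PySem.List.slice ordered none (some (max k 0))     -- ordered[:max(k, 0)]

-- ===== PRECONDITION & SPEC =====
-- Pre_ excludes arr = [] (A raises IndexError computing the median, B raises there too) and
-- k > len(arr), where A's pointers run off the segment: A then raises IndexError or returns extra
-- duplicated elements through Python's negative-index wraparound, an artefact of the loop.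
def Pre_solution_989_2 (arr : List Int) (k : Int) : Prop := arr ≠ [] ∧ k ≤ (arr.length : Int)
instance (arr : List Int) (k : Int) : Decidable (Pre_solution_989_2 arr k) := by unfold Pre_solution_989_2; infer_instance
def pvWitness_solution_989_2 : List Int × Int := ([3, 1, 2], 2)
def Spec_solution_989_2 (arr : List Int) (k : Int) (out : List Int) : Prop := out = solution_989_2_alt arr k
instance (arr : List Int) (k : Int) (out : List Int) : Decidable (Spec_solution_989_2 arr k out) := by unfold Spec_solution_989_2; infer_instance

-- ===== CLAIM (what is proved, stated in full; the proofs are below) =====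
def Claim_equal_solution_989_2 : Prop := ∀ (arr : List Int) (k : Int), Dom_solution_989_2 arr k → Pre_solution_989_2 arr k → Spec_solution_989_2 arr k (solution_989_2 arr k)

-- ===== LEMMAS AND PROOFS =====

-- B's sort key, packaged as one lexicographically ordered value
def pvKey (m x : Int) : Lex (Int × Int) := toLex (-(|x - m|), -x)

-- A's pick sequence, built front-to-back (pvLoopA appends; this is the same sequence)
def pvPick (s : List Int) (m : Int) : Nat → Int → Int → List Int
  | 0, _, _ => []
  | fuel + 1, l, r =>
      if m - PySem.List.pyGetD s l 0 > PySem.List.pyGetD s r 0 - m then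
        PySem.List.pyGetD s l 0 :: pvPick s m fuel (l + 1) r
      else
        PySem.List.pyGetD s r 0 :: pvPick s m fuel l (r - 1)

theorem pvLoopA_eq_pick (s : List Int) (m : Int) :
    ∀ (fuel : Nat) (res : List Int) (l r : Int),
      (pvLoopA s m fuel (res, l, r)).1 = res ++ pvPick s m fuel l r := by
  intro fuel
  induction fuel with
  | zero => intro res l r; simp [pvLoopA, pvPick]
  | succ n ih =>
      intro res l r
      simp only [pvLoopA, pvPick]
      split_ifs with h <;> rw [ih] <;> simp


theorem pvPick_take (s : List Int) (m : Int) :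
    ∀ (f g : Nat) (l r : Int), f ≤ g → (pvPick s m g l r).take f = pvPick s m f l r := by
  intro f
  induction f with
  | zero => intro g l r _; simp [pvPick]
  | succ n ih =>
      intro g l r hfg
      obtain ⟨g', rfl⟩ : ∃ g', g = g' + 1 := ⟨g - 1, by omega⟩
      simp only [pvPick]
      split_ifs with h <;> simp only [List.take_succ_cons] <;> rw [ih g' _ _ (by omega)]

theorem pvKey_le_iff (m a b : Int) :
    pvKey m a ≤ pvKey m b ↔ (-(|a - m|) < -(|b - m|) ∨ (-(|a - m|) = -(|b - m|) ∧ -a ≤ -b)) := by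
  simp [pvKey, Prod.Lex.toLex_le_toLex]

theorem pvStep_left (m al ar b : Int) (h1 : al ≤ b) (h2 : b ≤ ar)
    (hc : ar - m < m - al) : pvKey m al ≤ pvKey m b := by
  rw [pvKey_le_iff]
  rcases abs_cases (al - m) with ⟨e1, f1⟩ | ⟨e1, f1⟩ <;>
  rcases abs_cases (b - m) with ⟨e2, f2⟩ | ⟨e2, f2⟩ <;> omega

theorem pvStep_right (m al ar b : Int) (h1 : al ≤ b) (h2 : b ≤ ar)
    (hc : ¬ (ar - m < m - al)) : pvKey m ar ≤ pvKey m b := by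
  rw [pvKey_le_iff]
  rcases abs_cases (ar - m) with ⟨e1, f1⟩ | ⟨e1, f1⟩ <;>
  rcases abs_cases (b - m) with ⟨e2, f2⟩ | ⟨e2, f2⟩ <;> omega

theorem pvMem_seg (s : List Int) (a f : Nat) (b : Int) (hb : b ∈ (s.drop a).take f) :
    ∃ i : Nat, i < f ∧ ∃ h : a + i < s.length, b = s[a + i] := by
  obtain ⟨i, hi, hget⟩ := List.mem_iff_getElem.mp hb
  have hlen : i < f ∧ a + i < s.length := by
    have := hi
    simp [List.length_take, List.length_drop] at this
    omega
  refine ⟨i, hlen.1, hlen.2, ?_⟩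
  rw [← hget, List.getElem_take, List.getElem_drop]

-- main invariant: on a sorted s, the pick sequence over segment [l, l+fuel-1] is a permutation
-- of that segment and is nondecreasing in pvKey
theorem pvPick_inv (s : List Int)
    (hs : ∀ (p q : Nat) (hpq : p ≤ q) (hq : q < s.length), s[p]'(by omega) ≤ s[q])
    (m : Int) :
    ∀ (fuel l : Nat), l + fuel ≤ s.length →
      (pvPick s m fuel (l : Int) ((l : Int) + fuel - 1)).Perm ((s.drop l).take fuel) ∧
      (pvPick s m fuel (l : Int) ((l : Int) + fuel - 1)).Pairwise (fun a b => pvKey m a ≤ pvKey m b) := by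
  intro fuel
  induction fuel with
  | zero => intro l _; simp [pvPick]
  | succ n ih =>
      intro l hlen
      have hl : l < s.length := by omega
      have hr : l + n < s.length := by omega
      have hGl : PySem.List.pyGetD s (l : Int) 0 = s[l] := by
        rw [PySem.List.pyGetD_eq_getElem s 0 (by omega) (by exact_mod_cast hl)]
        simp
      have hGr : PySem.List.pyGetD s ((l : Int) + (n + 1 : Nat) - 1) 0 = s[l + n] := by
        rw [PySem.List.pyGetD_eq_getElem s 0 (by push_cast; omega) (by push_cast; omega)]
        congr 1
        omega
      simp only [pvPick]
      split_ifs with h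
      · -- picks the left end s[l]
        have harg1 : ((l : Int) + 1) = ((l + 1 : Nat) : Int) := by push_cast; ring
        have harg2 : ((l : Int) + (n + 1 : Nat) - 1) = (((l + 1 : Nat) : Int) + n - 1) := by push_cast; ring
        have ihx := ih (l + 1) (by omega)
        rw [hGl, harg2, harg1]
        have hseg : (s.drop l).take (n + 1) = s[l] :: (s.drop (l + 1)).take n := by
          rw [List.drop_eq_getElem_cons hl, List.take_succ_cons]
        constructor
        · rw [hseg]; exact (ihx.1).cons s[l]
        · refine List.pairwise_cons.mpr ⟨?_, ihx.2⟩
          intro b hbmem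
          have hb : b ∈ (s.drop (l + 1)).take n := (ihx.1).mem_iff.mp hbmem
          obtain ⟨i, hif, hidx, rfl⟩ := pvMem_seg s (l + 1) n b hb
          refine pvStep_left m s[l] s[l + n] _ ?_ ?_ ?_
          · exact hs l (l + 1 + i) (by omega) hidx
          · exact hs (l + 1 + i) (l + n) (by omega) hr
          · rw [hGl, hGr] at h; omega
      · -- picks the right end s[l + n]
        have harg2 : ((l : Int) + (n + 1 : Nat) - 1 - 1) = ((l : Int) + n - 1) := by push_cast; ring
        have ihx := ih l (by omega)
        rw [hGr, harg2]
        have hseg : (s.drop l).take (n + 1) = (s.drop l).take n ++ [s[l + n]] := by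
          rw [List.take_add_one]
          congr
          have : n < (s.drop l).length := by simp [List.length_drop]; omega
          rw [List.getElem?_eq_getElem this, List.getElem_drop]
          simp
        constructor
        · rw [hseg]
          refine ((ihx.1).cons s[l + n]).trans ?_
          simpa using (List.perm_append_comm (l₁ := [s[l + n]]) (l₂ := (s.drop l).take n))
        · refine List.pairwise_cons.mpr ⟨?_, ihx.2⟩
          intro b hbmem
          have hb : b ∈ (s.drop l).take n := (ihx.1).mem_iff.mp hbmem
          obtain ⟨i, hif, hidx, rfl⟩ := pvMem_seg s l n b hb
          refine pvStep_right m s[l] s[l + n] _ ?_ ?_ ?_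
          · exact hs l (l + i) (by omega) hidx
          · exact hs (l + i) (l + n) (by omega) hr
          · rw [hGl, hGr] at h; omega

theorem pvKey_injective (m : Int) : Function.Injective (pvKey m) := by
  intro a b hab
  have : ((-(|a - m|), -a) : Int × Int) = (-(|b - m|), -b) := by
    simpa [pvKey] using congrArg (fun p => ofLex p) hab
  have := congrArg Prod.snd this
  simpa using this

-- the full pick sequence (fuel = n) IS sorted(s, key=pvKey m)
theorem pvPick_eq_sorted (s : List Int)
    (hs : ∀ (p q : Nat) (hpq : p ≤ q) (hq : q < s.length), s[p]'(by omega) ≤ s[q])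
    (m : Int) :
    pvPick s m s.length 0 ((s.length : Int) - 1) = PySem.List.sorted s (pvKey m) := by
  have hinv := pvPick_inv s hs m s.length 0 (by omega)
  have hc : ((0 : Nat) : Int) + (s.length : Int) - 1 = (s.length : Int) - 1 := by push_cast; ring
  rw [hc] at hinv
  simp only [List.drop_zero, List.take_length] at hinv
  exact PySem.List.eq_of_perm_of_pairwise_le_of_injective (pvKey m) (pvKey_injective m)
    (hinv.1.trans (PySem.List.sorted_perm s (pvKey m) false).symm)
    hinv.2 (PySem.List.sorted_pairwise s (pvKey m))

-- sorted2 with keys (-|x-m|, -x) is sorted with the packaged lexicographic key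
theorem pvSorted2_eq (xs : List Int) (m : Int) :
    PySem.List.sorted2 xs (fun x => -(|x - m|)) (fun x => -x) = PySem.List.sorted xs (pvKey m) := by
  unfold PySem.List.sorted2 PySem.List.sorted
  simp only [if_neg (by decide : ¬ (false = true))]
  have hb : (fun (a b : Int) => decide ((-(|a - m|)) < (-(|b - m|))) || (!decide ((-(|b - m|)) < (-(|a - m|))) && decide ((-a) < (-b))))
      = (fun (a b : Int) => decide (pvKey m a < pvKey m b)) := by
    funext a b
    refine Bool.eq_iff_iff.mpr ?_
    simp only [pvKey, Bool.or_eq_true, Bool.and_eq_true, Bool.not_eq_true',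
      decide_eq_true_eq, decide_eq_false_iff_not, Prod.Lex.toLex_lt_toLex, not_lt]
    generalize -(|a - m|) = A
    generalize -(|b - m|) = B
    omega
  rw [hb]

-- ===== VERDICT (by name: the statement is the Claim_ definition above) =====
theorem solution_989_2_spec : Claim_equal_solution_989_2 := by
  intro arr k _ hpre
  obtain ⟨hne, hk⟩ := hpre
  unfold Spec_solution_989_2 solution_989_2 solution_989_2_alt
  simp only []
  set s := PySem.List.sorted arr (fun x => x) with hsdef
  set m := PySem.List.pyGetD s (PySem.Int.floordiv ((s.length : Int) - 1) 2) 0 with hmdef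
  have hslen : s.length = arr.length := PySem.List.length_sorted arr (fun x => x) false
  have hs : ∀ (p q : Nat) (hpq : p ≤ q) (hq : q < s.length), s[p]'(by omega) ≤ s[q] := by
    intro p q hpq hq
    exact PySem.List.sorted_id_getElem_mono arr hpq hq
  -- A's side: the loop is the pick sequence
  rw [pvLoopA_eq_pick, List.nil_append]
  -- B's side: the slice is a take of the sorted list
  rw [pvSorted2_eq, PySem.List.slice_to _ (le_max_right k 0)]
  have hkt : (max k 0).toNat = k.toNat := by omega
  rw [hkt]
  rw [← pvPick_eq_sorted s hs m]
  exact (pvPick_take s m k.toNat s.length 0 ((s.length : Int) - 1) (by omega)).symm
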